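-- pv_equiv track=rewrite | github.com/Yaserra/crypto-scanner- | crypto-scannerv8.py | _cashaddr_polymod
-- ===== SOURCE A (Python) =====
-- from typing import Set, Dict, List, Tuple, Optional, Union, NamedTuple, Any
--
-- def _cashaddr_polymod(prefix: str, data: List[int]) -> int:
--     """CashAddr polynomial modulus"""
--     generator = [0x98f2bc8e61, 0x79b76d99e2, 0xf33e5fb3c4, 0xae2eabe2a8, 0x1e4f43e470]
--     prefix_data = [ord(c) & 31 for c in prefix] + [0]
--     values = prefix_data + data + [0, 0, 0, 0, 0, 0, 0, 0]
--
--     polymod = 1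
--     for value in values:
--         top = polymod >> 35
--         polymod = ((polymod & 0x07ffffffff) << 5) ^ value
--         for i in range(5):
--             if (top >> i) & 1:
--                 polymod ^= generator[i]
--
--     return polymod ^ 1
-- ===== SOURCE B (Python) =====
-- GENERATOR = [0x98f2bc8e61, 0x79b76d99e2, 0xf33e5fb3c4, 0xae2eabe2a8, 0x1e4f43e470]
--
-- def _gen_table():
--     table = []
--     for t in range(32):
--         g = 0
--         for i in range(5):
--             if (t >> i) & 1:
--                 g ^= GENERATOR[i]
--         table.append(g)
--     return table
--
-- GEN_TABLE = _gen_table()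
--
-- def _cashaddr_polymod(prefix: str, data):
--     """CashAddr polynomial modulus (table-driven: the per-bit inner loop is a lookup)"""
--     values = [ord(c) & 31 for c in prefix] + [0] + data + [0] * 8
--     polymod = 1
--     for value in values:
--         top = polymod >> 35
--         polymod = ((polymod & 0x07ffffffff) << 5) ^ value ^ GEN_TABLE[top & 31]
--     return polymod ^ 1
-- ===== Notes on version B (the rewrite author's own statement) =====
-- stated objective: faster
-- what changed: The per-step inner 5-iteration loop that conditionally XORs each generator constant bit by bit is removed: a 32-entry table GEN_TABLE (indexed by the 5 top bits) is precomputed once and each step does a single table lookup and XOR.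
import Mathlib
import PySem

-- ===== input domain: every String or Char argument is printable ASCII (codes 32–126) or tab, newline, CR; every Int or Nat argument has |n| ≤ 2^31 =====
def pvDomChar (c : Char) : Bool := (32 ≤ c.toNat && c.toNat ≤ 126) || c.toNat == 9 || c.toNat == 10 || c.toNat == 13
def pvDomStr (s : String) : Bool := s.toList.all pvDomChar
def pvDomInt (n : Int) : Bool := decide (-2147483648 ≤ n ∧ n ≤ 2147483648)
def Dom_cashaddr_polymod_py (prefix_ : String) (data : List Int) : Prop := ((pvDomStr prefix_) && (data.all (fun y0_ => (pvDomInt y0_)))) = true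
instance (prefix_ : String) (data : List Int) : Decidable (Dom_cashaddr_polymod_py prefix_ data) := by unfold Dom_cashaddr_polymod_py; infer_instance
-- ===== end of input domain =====

-- B replaces the per-bit inner loop (5 conditional generator XORs per step) by a single
-- lookup in a 32-entry table precomputed once (objective: faster — measured).

-- ===== PORT A =====
-- literal port of _cashaddr_polymod: inner 5-iteration loop over the generator bits
def cashaddr_polymod_py (prefix_ : String) (data : List Int) : Int :=
  let generator : List Int := [0x98f2bc8e61, 0x79b76d99e2, 0xf33e5fb3c4, 0xae2eabe2a8, 0x1e4f43e470]
  let prefix_data : List Int := prefix_.toList.map (fun c => PySem.Int.band (Int.ofNat c.toNat) 31) ++ [0]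
  let values : List Int := prefix_data ++ data ++ [0, 0, 0, 0, 0, 0, 0, 0]
  let polymod : Int := values.foldl (fun polymod value =>
    let top := polymod >>> (35 : Nat)
    let polymod := PySem.Int.bxor ((PySem.Int.band polymod 0x07ffffffff) <<< (5 : Nat)) value
    (List.range 5).foldl (fun pm (i : Nat) =>
      if PySem.Int.band (top >>> i) 1 ≠ 0 then PySem.Int.bxor pm (generator.getD i 0) else pm)
      polymod) 1
  PySem.Int.bxor polymod 1

-- ===== PORT B =====
-- Source B's module-level GENERATOR and the 32-entry table GEN_TABLE computed once
def pvGenerator : List Int := [0x98f2bc8e61, 0x79b76d99e2, 0xf33e5fb3c4, 0xae2eabe2a8, 0x1e4f43e470]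

def pvGenTable : List Int :=
  (List.range 32).map (fun t =>
    (List.range 5).foldl (fun g (i : Nat) =>
      if PySem.Int.band ((Int.ofNat t) >>> i) 1 ≠ 0 then PySem.Int.bxor g (pvGenerator.getD i 0) else g) 0)

def cashaddr_polymod_py_alt (prefix_ : String) (data : List Int) : Int :=
  let values : List Int :=
    prefix_.toList.map (fun c => PySem.Int.band (Int.ofNat c.toNat) 31) ++ [0] ++ data ++ List.replicate 8 0
  let polymod : Int := values.foldl (fun polymod value =>
    let top := polymod >>> (35 : Nat)
    PySem.Int.bxor (PySem.Int.bxor ((PySem.Int.band polymod 0x07ffffffff) <<< (5 : Nat)) value)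
      (pvGenTable.getD (PySem.Int.band top 31).toNat 0)) 1
  PySem.Int.bxor polymod 1

-- ===== PRECONDITION & SPEC =====
def Spec_cashaddr_polymod_py (prefix_ : String) (data : List Int) (out : Int) : Prop := out = cashaddr_polymod_py_alt prefix_ data
instance (prefix_ : String) (data : List Int) (out : Int) : Decidable (Spec_cashaddr_polymod_py prefix_ data out) := by unfold Spec_cashaddr_polymod_py; infer_instance

-- ===== CLAIM (what is proved, stated in full; the proofs are below) =====
def Claim_equal_cashaddr_polymod_py : Prop := ∀ (prefix_ : String) (data : List Int), Dom_cashaddr_polymod_py prefix_ data → Spec_cashaddr_polymod_py prefix_ data (cashaddr_polymod_py prefix_ data)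

-- ===== LEMMAS AND PROOFS =====

-- a & 31 is a % 32 (Python semantics, also on negatives)
theorem pv_band31 (a : Int) : PySem.Int.band a 31 = a % 32 := by
  unfold PySem.Int.band
  have h1 := Nat.and_two_pow_sub_one_eq_mod a.toNat 5
  have h2 := Nat.and_two_pow_sub_one_eq_mod (-a - 1).toNat 5
  have h2' : (31 : Nat) &&& (-a - 1).toNat = (-a - 1).toNat % 32 := by
    rw [Nat.and_comm]; simpa using h2
  norm_num at h1
  simp only [show Int.toNat 31 = 31 from rfl]
  split_ifs with ha hb hb <;> omega

-- Python xor is associative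
theorem pv_bxor_assoc (a b c : Int) :
    PySem.Int.bxor (PySem.Int.bxor a b) c = PySem.Int.bxor a (PySem.Int.bxor b c) := by
  unfold PySem.Int.bxor
  split_ifs <;> simp_all [Nat.xor_assoc] <;> omega

theorem pv_gen_table_lit : pvGenTable = [0, 656907472481, 522768456162, 967538972547, 1044723512260, 462998945189, 595007253030, 79382357063, 748107326120, 235620756681, 925997890378, 341105636651, 399716405612, 849904983821, 157430696078, 808882357999, 130178868336, 578713250321, 446545427858, 1095394063347, 1019804932020, 504719530453, 638984506966, 52425474103, 757556840152, 174270482617, 866887507770, 348500070747, 289368683804, 943501032317, 253014715646, 696227635871] := by decide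

theorem pv_inner_eq (top base : Int) :
    (List.range 5).foldl (fun pm (i : Nat) =>
      if PySem.Int.band (top >>> i) 1 ≠ 0 then
        PySem.Int.bxor pm (([0x98f2bc8e61, 0x79b76d99e2, 0xf33e5fb3c4, 0xae2eabe2a8, 0x1e4f43e470] : List Int).getD i 0)
      else pm) base
    = PySem.Int.bxor base (pvGenTable.getD (PySem.Int.band top 31).toNat 0) := by
  have hb31 : PySem.Int.band top 31 = top % 32 := pv_band31 top
  obtain ⟨k, hk32, hkeq⟩ : ∃ k : Nat, k < 32 ∧ top % 32 = (k : Int) :=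
    ⟨(top % 32).toNat, by omega, by omega⟩
  have hc : ∀ i : Nat, PySem.Int.band (top >>> i) 1 = (top / ((2 ^ i : Nat) : Int)) % 2 := by
    intro i
    rw [Int.shiftRight_eq_div_pow, PySem.Int.band_one, PySem.Int.mod_eq_emod_of_pos (by norm_num)]
  have e0 : PySem.Int.band (top >>> (0 : Nat)) 1 = (k : Int) % 2 := by
    rw [hc 0]; push_cast; omega
  have e1 : PySem.Int.band (top >>> (1 : Nat)) 1 = ((k : Int) / 2) % 2 := by
    rw [hc 1]; push_cast; omega
  have e2 : PySem.Int.band (top >>> (2 : Nat)) 1 = ((k : Int) / 4) % 2 := by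
    rw [hc 2]; push_cast; omega
  have e3 : PySem.Int.band (top >>> (3 : Nat)) 1 = ((k : Int) / 8) % 2 := by
    rw [hc 3]; push_cast; omega
  have e4 : PySem.Int.band (top >>> (4 : Nat)) 1 = ((k : Int) / 16) % 2 := by
    rw [hc 4]; push_cast; omega
  rw [hb31, hkeq, show ((k : Int)).toNat = k from by omega, pv_gen_table_lit,
      show (List.range 5) = [0, 1, 2, 3, 4] from by decide]
  simp only [List.foldl_cons, List.foldl_nil, e0, e1, e2, e3, e4]
  interval_cases k <;> norm_num [List.getD, pv_bxor_assoc] <;> congr 1 <;> decide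

theorem cashaddr_polymod_py_spec : Claim_equal_cashaddr_polymod_py := by
  intro prefix_ data _
  unfold Spec_cashaddr_polymod_py cashaddr_polymod_py cashaddr_polymod_py_alt
  dsimp only
  congr 1
  congr 1
  funext pm v
  exact pv_inner_eq (pm >>> (35 : Nat)) _
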